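-- pv_equiv track=rewrite | github.com/HailKing/Questions | Python/SimpleCryptography.py | reversed_second
-- ===== SOURCE A (Python) =====
-- def reversed_second(t):
--     new = str()
--
--     for i in range(len(t)):
--         if i < int(len(t) / 2):
--             new += t[i]
--         else:
--             num = ord(t[i]) + 1
--             new += chr(num)
--     return new
-- ===== SOURCE B (Python) =====
-- def reversed_second(t):
--     half = len(t) // 2
--     return t[:half] + ''.join(chr(ord(c) + 1) for c in t[half:])
-- ===== Notes on version B (the rewrite author's own statement) =====
-- stated objective: simpler
-- what changed: Replaces the per-index loop with its branch (recomputing int(len(t)/2) each iteration) by one slice split: copy t[:half] unchanged and shift only t[half:] in a single comprehension.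
import Mathlib
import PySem

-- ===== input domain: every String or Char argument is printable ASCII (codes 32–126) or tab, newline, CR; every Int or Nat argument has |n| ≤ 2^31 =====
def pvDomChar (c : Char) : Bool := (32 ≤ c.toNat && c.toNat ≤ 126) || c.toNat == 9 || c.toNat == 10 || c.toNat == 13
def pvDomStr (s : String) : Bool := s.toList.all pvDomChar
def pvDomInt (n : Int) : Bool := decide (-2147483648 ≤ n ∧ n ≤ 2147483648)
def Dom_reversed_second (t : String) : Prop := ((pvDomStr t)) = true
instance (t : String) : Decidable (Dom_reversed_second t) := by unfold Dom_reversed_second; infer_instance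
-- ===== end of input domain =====

-- B replaces the per-index loop with its branch by a slice split: copy the first
-- half unchanged, shift only the second half (objective: simpler).

-- ===== PORT A =====
-- per-index loop with a branch on i < len(t)/2, appending one character each step
def reversed_second (t : String) : String :=
  let cs := t.toList
  String.mk ((List.range cs.length).foldl
    (fun (new : List Char) (i : Nat) =>
      if i < cs.length / 2 then
        new ++ [cs.getD i ' ']
      else
        new ++ [Char.ofNat ((cs.getD i ' ').toNat + 1)])
    [])

-- ===== PORT B =====
def reversed_second_alt (t : String) : String :=
  let cs := t.toList
  let half := cs.length / 2
  String.mk (cs.take half ++ (cs.drop half).map (fun c => Char.ofNat (c.toNat + 1)))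

-- ===== PRECONDITION & SPEC =====
def Spec_reversed_second (t : String) (out : String) : Prop := out = reversed_second_alt t
instance (t : String) (out : String) : Decidable (Spec_reversed_second t out) := by unfold Spec_reversed_second; infer_instance

-- ===== CLAIM (what is proved, stated in full; the proofs are below) =====
def Claim_equal_reversed_second : Prop := ∀ (t : String), Dom_reversed_second t → Spec_reversed_second t (reversed_second t)

-- ===== LEMMAS AND PROOFS =====

theorem pv_foldl_range_append_map {α : Type} (g : Nat → α) :
    ∀ (n : Nat), (List.range n).foldl (fun acc i => acc ++ [g i]) [] = (List.range n).map g := by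
  intro n
  induction n with
  | zero => simp
  | succ n ih => simp [List.range_succ, ih]

theorem pv_split_map {α : Type} (cs : List α) (d : α) (f : α → α) (half : Nat)
    (h : half ≤ cs.length) :
    (List.range cs.length).map
        (fun i => if i < half then cs.getD i d else f (cs.getD i d))
      = cs.take half ++ (cs.drop half).map f := by
  apply List.ext_getElem
  · simp; omega
  · intro i h1 h2
    have hi : i < cs.length := by simpa using h1
    rw [List.getElem_map, List.getElem_range]
    by_cases hlt : i < half
    · rw [List.getElem_append_left (by simp; omega)]
      simp [hlt, List.getElem?_eq_getElem hi, List.getElem_take]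
    · rw [List.getElem_append_right (by simp; omega)]
      simp [hlt, List.getElem?_eq_getElem hi, Nat.min_eq_left h,
        show half + (i - half) = i from by omega]

-- ===== VERDICT (by name: the statement is the Claim_ definition above) =====
theorem reversed_second_spec : Claim_equal_reversed_second := by
  intro t _
  unfold Spec_reversed_second reversed_second reversed_second_alt
  simp only
  rw [show (fun (new : List Char) (i : Nat) =>
        if i < t.toList.length / 2 then new ++ [t.toList.getD i ' ']
        else new ++ [Char.ofNat ((t.toList.getD i ' ').toNat + 1)])
      = (fun (acc : List Char) (i : Nat) => acc ++
          [if i < t.toList.length / 2 then t.toList.getD i ' '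
           else Char.ofNat ((t.toList.getD i ' ').toNat + 1)]) from by
        funext new i; by_cases hc : i < t.length / 2 <;> simp [hc]]
  rw [pv_foldl_range_append_map
      (fun i => if i < t.toList.length / 2 then t.toList.getD i ' '
                else Char.ofNat ((t.toList.getD i ' ').toNat + 1))]
  rw [pv_split_map t.toList ' ' (fun c => Char.ofNat (c.toNat + 1)) (t.toList.length / 2)
      (Nat.div_le_self _ _)]
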